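-- pv_equiv track=rewrite | github.com/chlendyd7/Algorithm | 레거시/BJO/동적계획법/동적 계획법 2/앱/240619.py | min_cost_to_free_memory
-- ===== SOURCE A (Python) =====
-- def min_cost_to_free_memory(N, M, memories, costs):
--     max_cost = sum(costs)
--     dp = [0] * (max_cost + 1)
--
--     for i in range(N):
--         memory = memories[i]
--         cost = costs[i]
--
--         for j in range(max_cost, cost -1, -1):
--             dp[j] = max(dp[j], dp[j-cost] + memory)
--
--     for k in range(max_cost + 1):
--         if dp[k] >= M:
--             return k
--     return -1
-- ===== SOURCE B (Python) =====
-- def min_cost_to_free_memory(N, M, memories, costs):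
--     # Direct subset enumeration: build every subset's (freed memory, cost) pair,
--     # then take the cheapest subset freeing at least M.
--     if M <= 0:
--         return 0
--     sums = [(0, 0)]
--     for i in range(N):
--         mem, cost = memories[i], costs[i]
--         sums += [(sm + mem, sc + cost) for sm, sc in sums]
--     best = -1
--     for sm, sc in sums:
--         if sm >= M and (best == -1 or sc < best):
--             best = sc
--     return best
-- ===== Notes on version B (the rewrite author's own statement) =====
-- stated objective: simpler
-- what changed: B replaces A's pseudo-polynomial cost-axis DP table and first-affordable-budget scan by a direct enumeration of every subset's (freed memory, total cost) pair, returning the cheapest pair that frees at least M.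
-- outside the precondition, e.g. on min_cost_to_free_memory(2, 1, [4, 4], [-1, -2]): A returns -1, B returns -3; on min_cost_to_free_memory(1, 1, [5], [1, -5]): A returns -1, B returns 1; on min_cost_to_free_memory(0, 0, [], [-1]): A returns -1, B returns 0
import Mathlib
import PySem

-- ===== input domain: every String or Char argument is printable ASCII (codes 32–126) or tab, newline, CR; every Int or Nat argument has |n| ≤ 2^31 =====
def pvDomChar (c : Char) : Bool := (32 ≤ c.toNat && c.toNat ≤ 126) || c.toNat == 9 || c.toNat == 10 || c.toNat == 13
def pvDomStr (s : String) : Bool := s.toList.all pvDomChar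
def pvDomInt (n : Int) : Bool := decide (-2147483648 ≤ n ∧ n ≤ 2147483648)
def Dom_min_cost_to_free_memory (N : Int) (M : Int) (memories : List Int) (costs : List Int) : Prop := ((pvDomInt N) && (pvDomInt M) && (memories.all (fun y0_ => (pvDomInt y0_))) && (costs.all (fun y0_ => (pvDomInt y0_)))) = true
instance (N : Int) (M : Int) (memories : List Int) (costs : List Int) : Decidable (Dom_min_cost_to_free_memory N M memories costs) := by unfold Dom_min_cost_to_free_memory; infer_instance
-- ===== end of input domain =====

-- B replaces A's cost-axis knapsack DP table (size sum(costs)+1) and scan by direct enumeration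
-- of all subsets' (freed memory, cost) pairs; objective: simpler (no DP table bookkeeping).


-- ===== PORT A =====
-- dp[j] = max(dp[j], dp[j-cost] + memory)
def aStep (memory cost : Int) (dp : List Int) (j : Int) : List Int :=
  PySem.List.pySetD dp j
    (max (PySem.List.pyGetD dp j 0) (PySem.List.pyGetD dp (j - cost) 0 + memory))

-- for j in range(max_cost, cost - 1, -1): ...
def aInner (max_cost memory cost : Int) (dp : List Int) : List Int :=
  (PySem.List.pyRange max_cost (cost - 1) (-1)).foldl (aStep memory cost) dp

def min_cost_to_free_memory (N : Int) (M : Int) (memories : List Int) (costs : List Int) : Int :=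
  let max_cost := costs.sum
  let dp0 : List Int := List.replicate (max_cost + 1).toNat 0
  let dp := (PySem.List.pyRange 0 N 1).foldl
    (fun dp i =>
      aInner max_cost (PySem.List.pyGetD memories i 0) (PySem.List.pyGetD costs i 0) dp) dp0
  -- for k in range(max_cost + 1): if dp[k] >= M: return k / return -1
  match (PySem.List.pyRange 0 (max_cost + 1) 1).find?
      (fun k => decide (M ≤ PySem.List.pyGetD dp k 0)) with
  | some k => k
  | none => -1

-- ===== PORT B =====
def min_cost_to_free_memory_alt (N : Int) (M : Int) (memories : List Int) (costs : List Int) : Int :=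
  if M ≤ 0 then 0
  else
    -- sums += [(sm + mem, sc + cost) for sm, sc in sums]
    let sums := (PySem.List.pyRange 0 N 1).foldl
      (fun sums i =>
        sums ++ sums.map (fun p =>
          (p.1 + PySem.List.pyGetD memories i 0, p.2 + PySem.List.pyGetD costs i 0)))
      [((0 : Int), (0 : Int))]
    -- for sm, sc in sums: if sm >= M and (best == -1 or sc < best): best = sc
    sums.foldl (fun best p =>
      if M ≤ p.1 ∧ (best = -1 ∨ p.2 < best) then p.2 else best) (-1)

-- ===== PRECONDITION & SPEC =====
-- Pre_ restricts to the task's natural domain: N ≤ len(memories), len(costs) (beyond which A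
-- raises IndexError), nonnegative costs among the first N apps (a negative cost is outside the
-- problem's meaning: A raises IndexError there or truncates its cost-axis dp array, see the
-- cites), and — except in the vacuous N ≤ 0, M > 0 case — the ignored costs beyond index N must
-- not make sum(costs) negative, a corner no caller would specify, on which A's empty dp array
-- and B's "freeing nothing is free" answer are both defensible (see the cites).
def Pre_min_cost_to_free_memory (N : Int) (M : Int) (memories : List Int) (costs : List Int) : Prop :=
  N ≤ (memories.length : Int) ∧ N ≤ (costs.length : Int) ∧
    (∀ c ∈ costs.take N.toNat, 0 ≤ c) ∧
    (0 ≤ (costs.drop N.toNat).sum ∨ (N ≤ 0 ∧ 0 < M))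
instance (N : Int) (M : Int) (memories : List Int) (costs : List Int) : Decidable (Pre_min_cost_to_free_memory N M memories costs) := by unfold Pre_min_cost_to_free_memory; infer_instance

def pvWitness_min_cost_to_free_memory : Int × Int × List Int × List Int := (3, 5, [2, 4, 3], [3, 5, 2])

def Spec_min_cost_to_free_memory (N : Int) (M : Int) (memories : List Int) (costs : List Int) (out : Int) : Prop := out = min_cost_to_free_memory_alt N M memories costs
instance (N : Int) (M : Int) (memories : List Int) (costs : List Int) (out : Int) : Decidable (Spec_min_cost_to_free_memory N M memories costs out) := by unfold Spec_min_cost_to_free_memory; infer_instance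

-- ===== CLAIM (what is proved, stated in full; the proofs are below) =====
def Claim_equal_min_cost_to_free_memory : Prop := ∀ (N : Int) (M : Int) (memories : List Int) (costs : List Int), Dom_min_cost_to_free_memory N M memories costs → Pre_min_cost_to_free_memory N M memories costs → Spec_min_cost_to_free_memory N M memories costs (min_cost_to_free_memory N M memories costs)

-- ===== LEMMAS AND PROOFS =====

-- maximum memory freeable with cost budget j over subsets of the (mem, cost) item list;
-- the head is the item A's loop processed last.
def bestMem : List (Int × Int) → Int → Int
  | [], _ => 0
  | (m, c) :: t, j => if c ≤ j then max (bestMem t j) (bestMem t (j - c) + m) else bestMem t j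

-- all subsets' (memory sum, cost sum) pairs; the head item is appended last, matching B's loop
-- on the reversed item list
def pairsR : List (Int × Int) → List (Int × Int)
  | [] => [(0, 0)]
  | (m, c) :: t => pairsR t ++ (pairsR t).map (fun p => (p.1 + m, p.2 + c))

theorem bestMem_nonneg (ps : List (Int × Int)) (j : Int) : 0 ≤ bestMem ps j := by
  induction ps generalizing j with
  | nil => simp [bestMem]
  | cons p t ih =>
    obtain ⟨m, c⟩ := p
    simp only [bestMem]
    split_ifs with h
    · exact le_trans (ih j) (le_max_left _ _)
    · exact ih j

theorem pairsR_cost_nonneg (ps : List (Int × Int)) (hc : ∀ p ∈ ps, 0 ≤ p.2) :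
    ∀ q ∈ pairsR ps, 0 ≤ q.2 := by
  induction ps with
  | nil => simp [pairsR]
  | cons p t ih =>
    obtain ⟨m, c⟩ := p
    have hc0 : 0 ≤ c := hc (m, c) (by simp)
    have hctl : ∀ p ∈ t, 0 ≤ p.2 := fun p hp => hc p (by simp [hp])
    intro q hq
    simp only [pairsR, List.mem_append, List.mem_map] at hq
    rcases hq with hq | ⟨r, hr, rfl⟩
    · exact ih hctl q hq
    · have := ih hctl r hr
      simp only
      omega

theorem pairsR_cost_le_csum (ps : List (Int × Int)) (hc : ∀ p ∈ ps, 0 ≤ p.2) :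
    ∀ q ∈ pairsR ps, q.2 ≤ (ps.map (·.2)).sum := by
  induction ps with
  | nil => simp [pairsR]
  | cons p t ih =>
    obtain ⟨m, c⟩ := p
    have hc0 : 0 ≤ c := hc (m, c) (by simp)
    have hctl : ∀ p ∈ t, 0 ≤ p.2 := fun p hp => hc p (by simp [hp])
    intro q hq
    simp only [pairsR, List.mem_append, List.mem_map] at hq
    simp only [List.map_cons, List.sum_cons]
    rcases hq with hq | ⟨r, hr, rfl⟩
    · have := ih hctl q hq
      omega
    · have := ih hctl r hr
      simp only
      omega

-- the bridge: budget k suffices for target M iff some subset frees ≥ M within cost k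
theorem bestMem_pairs (ps : List (Int × Int)) (hc : ∀ p ∈ ps, 0 ≤ p.2) (M k : Int) (hk : 0 ≤ k) :
    (M ≤ bestMem ps k) ↔ ∃ q ∈ pairsR ps, M ≤ q.1 ∧ q.2 ≤ k := by
  induction ps generalizing M k with
  | nil =>
    simp only [bestMem, pairsR, List.mem_singleton]
    constructor
    · intro h
      exact ⟨(0, 0), rfl, h, hk⟩
    · rintro ⟨q, rfl, hq1, _⟩
      exact hq1
  | cons p tl ih =>
    obtain ⟨m, c⟩ := p
    have hc0 : 0 ≤ c := hc (m, c) (by simp)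
    have hctl : ∀ p ∈ tl, 0 ≤ p.2 := fun p hp => hc p (by simp [hp])
    have hsplit : (M ≤ bestMem ((m, c) :: tl) k) ↔
        (M ≤ bestMem tl k) ∨ (c ≤ k ∧ M - m ≤ bestMem tl (k - c)) := by
      simp only [bestMem]
      split_ifs with h
      · rw [le_max_iff]
        constructor
        · rintro (h1 | h1)
          · exact Or.inl h1
          · exact Or.inr ⟨h, by omega⟩
        · rintro (h1 | ⟨_, h1⟩)
          · exact Or.inl h1
          · exact Or.inr (by omega)
      · constructor
        · exact Or.inl
        · rintro (h1 | ⟨h1, _⟩)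
          · exact h1
          · exact absurd h1 h
    have hrhs : (∃ q ∈ pairsR ((m, c) :: tl), M ≤ q.1 ∧ q.2 ≤ k) ↔
        (∃ q ∈ pairsR tl, M ≤ q.1 ∧ q.2 ≤ k) ∨
        (∃ r ∈ pairsR tl, M - m ≤ r.1 ∧ r.2 ≤ k - c) := by
      simp only [pairsR, List.mem_append, List.mem_map]
      constructor
      · rintro ⟨q, hq | ⟨r, hr, rfl⟩, h1, h2⟩
        · exact Or.inl ⟨q, hq, h1, h2⟩
        · exact Or.inr ⟨r, hr, by simp only at h1 h2 ⊢; omega, by simp only at h1 h2 ⊢; omega⟩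
      · rintro (⟨q, hq, h1, h2⟩ | ⟨r, hr, h1, h2⟩)
        · exact ⟨q, Or.inl hq, h1, h2⟩
        · exact ⟨(r.1 + m, r.2 + c), Or.inr ⟨r, hr, rfl⟩, by simp only; omega, by simp only; omega⟩
    rw [hsplit, hrhs, ih hctl M k hk]
    have hdisj2 : (c ≤ k ∧ M - m ≤ bestMem tl (k - c)) ↔
        (∃ r ∈ pairsR tl, M - m ≤ r.1 ∧ r.2 ≤ k - c) := by
      by_cases hck : c ≤ k
      · rw [ih hctl (M - m) (k - c) (by omega)]
        constructor
        · rintro ⟨_, h1⟩; exact h1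
        · intro h1; exact ⟨hck, h1⟩
      · constructor
        · rintro ⟨h1, _⟩; exact absurd h1 hck
        · rintro ⟨r, hr, _, h2⟩
          have := pairsR_cost_nonneg tl hctl r hr
          omega
    rw [hdisj2]

-- B's final scan: the running best is the minimum qualifying cost (−1 = none yet)
theorem scan_spec (M : Int) :
    ∀ (l : List (Int × Int)) (b : Int), (∀ p ∈ l, 0 ≤ p.2) → (0 ≤ b ∨ b = -1) →
      (l.foldl (fun best p => if M ≤ p.1 ∧ (best = -1 ∨ p.2 < best) then p.2 else best) b = b ∧
        ∀ q ∈ l, M ≤ q.1 → (b ≠ -1 ∧ b ≤ q.2)) ∨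
      (0 ≤ l.foldl (fun best p => if M ≤ p.1 ∧ (best = -1 ∨ p.2 < best) then p.2 else best) b ∧
        (∃ q ∈ l, M ≤ q.1 ∧ q.2 =
          l.foldl (fun best p => if M ≤ p.1 ∧ (best = -1 ∨ p.2 < best) then p.2 else best) b) ∧
        (∀ q ∈ l, M ≤ q.1 →
          l.foldl (fun best p => if M ≤ p.1 ∧ (best = -1 ∨ p.2 < best) then p.2 else best) b ≤ q.2) ∧
        (b ≠ -1 →
          l.foldl (fun best p => if M ≤ p.1 ∧ (best = -1 ∨ p.2 < best) then p.2 else best) b ≤ b)) := by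
  intro l
  induction l with
  | nil =>
    intro b _ _
    exact Or.inl ⟨rfl, by simp⟩
  | cons q t ih =>
    intro b hl hb
    have hq2 : 0 ≤ q.2 := hl q (by simp)
    have htl : ∀ p ∈ t, 0 ≤ p.2 := fun p hp => hl p (by simp [hp])
    simp only [List.foldl_cons]
    by_cases hcond : M ≤ q.1 ∧ (b = -1 ∨ q.2 < b)
    · rw [if_pos hcond]
      rcases ih q.2 htl (Or.inl hq2) with ⟨heq, hall⟩ | ⟨h0, ⟨r, hr, hr1, hr2⟩, hmin, hle⟩
      · refine Or.inr ⟨by omega, ⟨q, by simp, hcond.1, heq.symm⟩, ?_, ?_⟩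
        · intro q' hq' hq'1
          rcases List.mem_cons.mp hq' with rfl | hq'
          · omega
          · have := hall q' hq' hq'1
            omega
        · intro hbne
          rcases hcond.2 with h | h
          · exact absurd h hbne
          · omega
      · refine Or.inr ⟨h0, ⟨r, by simp [hr], hr1, hr2⟩, ?_, ?_⟩
        · intro q' hq' hq'1
          have hleq2 := hle (by omega)
          rcases List.mem_cons.mp hq' with rfl | hq'
          · omega
          · exact hmin q' hq' hq'1
        · intro hbne
          have hleq2 := hle (by omega)
          rcases hcond.2 with h | h
          · exact absurd h hbne
          · omega
    · rw [if_neg hcond]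
      rcases ih b htl hb with ⟨heq, hall⟩ | ⟨h0, ⟨r, hr, hr1, hr2⟩, hmin, hle⟩
      · refine Or.inl ⟨heq, ?_⟩
        intro q' hq' hq'1
        rcases List.mem_cons.mp hq' with rfl | hq'
        · constructor
          · intro hbm
            exact hcond ⟨hq'1, Or.inl hbm⟩
          · by_contra hlt
            rw [not_le] at hlt
            rcases hb with hb0 | hbm
            · exact hcond ⟨hq'1, Or.inr (by omega)⟩
            · exact hcond ⟨hq'1, Or.inl hbm⟩
        · exact hall q' hq' hq'1
      · refine Or.inr ⟨h0, ⟨r, by simp [hr], hr1, hr2⟩, ?_, hle⟩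
        intro q' hq' hq'1
        rcases List.mem_cons.mp hq' with rfl | hq'
        · -- q' = q is a qualifier the fold skipped: then b ≠ -1 and b ≤ q'.2
          have hbq : b ≠ -1 ∧ b ≤ q'.2 := by
            constructor
            · intro hbm; exact hcond ⟨hq'1, Or.inl hbm⟩
            · by_contra hlt
              rw [not_le] at hlt
              rcases hb with hb0 | hbm
              · exact hcond ⟨hq'1, Or.inr (by omega)⟩
              · exact hcond ⟨hq'1, Or.inl hbm⟩
          have := hle hbq.1
          omega
        · exact hmin q' hq' hq'1

theorem descFoldl_length (upd : Int → Int → Int) (g : Int → Int) (l : List Int) (dp : List Int) :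
    (l.foldl (fun dp j => PySem.List.pySetD dp j
      (upd (PySem.List.pyGetD dp j 0) (PySem.List.pyGetD dp (g j) 0))) dp).length = dp.length := by
  induction l generalizing dp with
  | nil => rfl
  | cons x xs ih =>
    simp only [List.foldl_cons]
    rw [ih]
    exact PySem.List.length_pySetD _ _ _

-- pointwise description of a descending-range update loop that only reads at or below the cell
theorem descFoldl_get (upd : Int → Int → Int) (g : Int → Int)
    (b : Int) (hb : -1 ≤ b) (hg : ∀ j, b < j → 0 ≤ g j ∧ g j ≤ j) :
    ∀ (n : Nat) (a : Int), (a - b).toNat = n → ∀ (dp : List Int), a < (dp.length : Int) →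
      ∀ j : Int, 0 ≤ j →
        PySem.List.pyGetD ((PySem.List.pyRange a b (-1)).foldl
            (fun dp j => PySem.List.pySetD dp j
              (upd (PySem.List.pyGetD dp j 0) (PySem.List.pyGetD dp (g j) 0))) dp) j 0
          = if b < j ∧ j ≤ a then
              upd (PySem.List.pyGetD dp j 0) (PySem.List.pyGetD dp (g j) 0)
            else PySem.List.pyGetD dp j 0 := by
  intro n
  induction n with
  | zero =>
    intro a ha dp hlen j hj
    have hab : a ≤ b := by omega
    rw [PySem.List.pyRange_neg_one_eq_nil hab]
    simp only [List.foldl_nil]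
    rw [if_neg (by omega)]
  | succ n ih =>
    intro a ha dp hlen j hj
    have hba : b < a := by omega
    have ha0 : 0 ≤ a := by omega
    rw [PySem.List.pyRange_neg_one_cons hba]
    simp only [List.foldl_cons]
    set v := upd (PySem.List.pyGetD dp a 0) (PySem.List.pyGetD dp (g a) 0) with hv
    set dp' := PySem.List.pySetD dp a v with hdp'
    have hlen' : dp'.length = dp.length := by
      rw [hdp']; exact PySem.List.length_pySetD _ _ _
    have hget' : ∀ x : Int, 0 ≤ x → PySem.List.pyGetD dp' x 0 =
        if x = a then v else PySem.List.pyGetD dp x 0 := by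
      intro x hx
      have hxN : x = ((x.toNat : Nat) : Int) := by omega
      have haN : a = ((a.toNat : Nat) : Int) := by omega
      have hlt : a.toNat < dp.length := by omega
      rw [hdp', haN, hxN, PySem.List.pyGetD_pySetD_natCast dp a.toNat x.toNat v 0 hlt]
      by_cases hxa : x.toNat = a.toNat
      · rw [if_pos hxa, if_pos (by omega)]
      · rw [if_neg hxa, if_neg (by omega)]
    have hmain := ih (a - 1) (by omega) dp' (by omega) j hj
    rw [hmain]
    by_cases hcase : b < j ∧ j ≤ a - 1
    · rw [if_pos hcase, if_pos (by omega)]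
      have hja : j ≠ a := by omega
      have hgj := hg j (by omega)
      have hgja : g j ≠ a := by omega
      rw [hget' j hj, if_neg hja, hget' (g j) hgj.1, if_neg hgja]
    · rw [if_neg hcase]
      by_cases hja : j = a
      · subst hja
        rw [hget' j hj, if_pos rfl, if_pos (by omega)]
      · rw [hget' j hj, if_neg hja, if_neg (by omega)]

theorem take_zip_succ (ms cs : List Int) (k : Nat) (h1 : k < ms.length) (h2 : k < cs.length) :
    (ms.take (k + 1)).zip (cs.take (k + 1)) =
      (ms.take k).zip (cs.take k) ++ [(ms[k], cs[k])] := by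
  rw [List.take_add_one, List.take_add_one, List.getElem?_eq_getElem h1,
    List.getElem?_eq_getElem h2]
  simp only [Option.toList_some]
  rw [List.zip_append (by simp; omega)]
  rfl

theorem aOuter_inv (N : Int) (ms cs : List Int)
    (hNm : N.toNat ≤ ms.length) (hNc : N.toNat ≤ cs.length)
    (hcsT : ∀ c ∈ cs.take N.toNat, 0 ≤ c) (hmc0 : 0 ≤ cs.sum) :
    ∀ k : Nat, k ≤ N.toNat →
      ((PySem.List.pyRange 0 (k : Int) 1).foldl
          (fun dp i => aInner cs.sum (PySem.List.pyGetD ms i 0) (PySem.List.pyGetD cs i 0) dp)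
          (List.replicate (cs.sum + 1).toNat 0)).length = (cs.sum + 1).toNat ∧
      ∀ j : Int, 0 ≤ j → j ≤ cs.sum →
        PySem.List.pyGetD ((PySem.List.pyRange 0 (k : Int) 1).foldl
            (fun dp i => aInner cs.sum (PySem.List.pyGetD ms i 0) (PySem.List.pyGetD cs i 0) dp)
            (List.replicate (cs.sum + 1).toNat 0)) j 0 =
          bestMem (((ms.take k).zip (cs.take k)).reverse) j := by
  intro k
  induction k with
  | zero =>
    intro _
    constructor
    · simp
    · intro j hj hjmc
      rw [show ((0 : Nat) : Int) = 0 from rfl, PySem.List.pyRange_one_eq_nil le_rfl]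
      simp only [List.foldl_nil, List.take_zero, List.zip_nil_left, List.reverse_nil]
      have hjN : j = ((j.toNat : Nat) : Int) := by omega
      have hjlt : j.toNat < (cs.sum + 1).toNat := by omega
      rw [hjN, PySem.List.pyGetD_natCast,
        List.getD_eq_getElem _ _ (by simpa using hjlt), List.getElem_replicate]
      rfl
  | succ k ih =>
    intro hk
    have hk' : k ≤ N.toNat := by omega
    obtain ⟨ihlen, ihget⟩ := ih hk'
    have hkm : k < ms.length := by omega
    have hkc : k < cs.length := by omega
    have hrange : PySem.List.pyRange 0 ((k + 1 : Nat) : Int) 1 =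
        PySem.List.pyRange 0 (k : Int) 1 ++ [(k : Int)] := by
      push_cast
      exact PySem.List.pyRange_one_succ_right (by positivity)
    rw [hrange]
    simp only [List.foldl_append, List.foldl_cons, List.foldl_nil]
    have hmem : PySem.List.pyGetD ms ((k : Nat) : Int) 0 = ms[k] := by
      rw [PySem.List.pyGetD_natCast, List.getD_eq_getElem _ _ hkm]
    have hcost : PySem.List.pyGetD cs ((k : Nat) : Int) 0 = cs[k] := by
      rw [PySem.List.pyGetD_natCast, List.getD_eq_getElem _ _ hkc]
    rw [hmem, hcost]
    have hc0 : 0 ≤ cs[k] := by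
      have hk2 : k < (cs.take N.toNat).length := by rw [List.length_take]; omega
      have h := hcsT _ (List.getElem_mem hk2)
      rwa [List.getElem_take] at h
    have hAeq : ∀ dp : List Int, aInner cs.sum ms[k] cs[k] dp =
        (PySem.List.pyRange cs.sum (cs[k] - 1) (-1)).foldl
          (fun dp j => PySem.List.pySetD dp j
            ((fun x y => max x (y + ms[k]))
              (PySem.List.pyGetD dp j 0)
              (PySem.List.pyGetD dp ((fun j => j - cs[k]) j) 0))) dp := fun _ => rfl
    set dpk := (PySem.List.pyRange 0 (k : Int) 1).foldl
      (fun dp i => aInner cs.sum (PySem.List.pyGetD ms i 0) (PySem.List.pyGetD cs i 0) dp)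
      (List.replicate (cs.sum + 1).toNat 0) with hdpk
    constructor
    · rw [hAeq, descFoldl_length (fun x y => max x (y + ms[k])) (fun j => j - cs[k])]
      exact ihlen
    · intro j hj hjmc
      rw [hAeq, descFoldl_get (fun x y => max x (y + ms[k])) (fun j => j - cs[k]) (cs[k] - 1)
        (by omega) (by intro j hj; dsimp only; omega) ((cs.sum - (cs[k] - 1)).toNat) cs.sum rfl dpk
        (by omega) j hj]
      rw [take_zip_succ ms cs k hkm hkc, List.reverse_append]
      simp only [List.reverse_cons, List.reverse_nil, List.nil_append, List.singleton_append]
      show _ = bestMem ((ms[k], cs[k]) :: ((ms.take k).zip (cs.take k)).reverse) j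
      simp only [bestMem]
      by_cases hcj : cs[k] ≤ j
      · rw [if_pos (by omega), if_pos hcj, ihget j hj hjmc,
          ihget (j - cs[k]) (by omega) (by omega)]
      · rw [if_neg (by omega), if_neg hcj, ihget j hj hjmc]

theorem bBuild_inv (N : Int) (ms cs : List Int)
    (hNm : N.toNat ≤ ms.length) (hNc : N.toNat ≤ cs.length) :
    ∀ k : Nat, k ≤ N.toNat →
      (PySem.List.pyRange 0 (k : Int) 1).foldl
          (fun sums i => sums ++ sums.map (fun p =>
            (p.1 + PySem.List.pyGetD ms i 0, p.2 + PySem.List.pyGetD cs i 0)))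
          [((0 : Int), (0 : Int))]
        = pairsR (((ms.take k).zip (cs.take k)).reverse) := by
  intro k
  induction k with
  | zero =>
    intro _
    rw [show ((0 : Nat) : Int) = 0 from rfl, PySem.List.pyRange_one_eq_nil le_rfl]
    simp [pairsR]
  | succ k ih =>
    intro hk
    have hk' : k ≤ N.toNat := by omega
    have hkm : k < ms.length := by omega
    have hkc : k < cs.length := by omega
    have hrange : PySem.List.pyRange 0 ((k + 1 : Nat) : Int) 1 =
        PySem.List.pyRange 0 (k : Int) 1 ++ [(k : Int)] := by
      push_cast
      exact PySem.List.pyRange_one_succ_right (by positivity)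
    rw [hrange]
    simp only [List.foldl_append, List.foldl_cons, List.foldl_nil]
    have hmem : PySem.List.pyGetD ms ((k : Nat) : Int) 0 = ms[k] := by
      rw [PySem.List.pyGetD_natCast, List.getD_eq_getElem _ _ hkm]
    have hcost : PySem.List.pyGetD cs ((k : Nat) : Int) 0 = cs[k] := by
      rw [PySem.List.pyGetD_natCast, List.getD_eq_getElem _ _ hkc]
    rw [hmem, hcost, ih hk']
    rw [take_zip_succ ms cs k hkm hkc, List.reverse_append]
    simp only [List.reverse_cons, List.reverse_nil, List.nil_append, List.singleton_append]
    rfl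

theorem final_assembly (N M : Int) (ms cs : List Int)
    (hNm : N ≤ (ms.length : Int)) (hNc : N ≤ (cs.length : Int))
    (hcsT : ∀ c ∈ cs.take N.toNat, 0 ≤ c)
    (hlast : 0 ≤ (cs.drop N.toNat).sum ∨ (N ≤ 0 ∧ 0 < M)) :
    min_cost_to_free_memory N M ms cs = min_cost_to_free_memory_alt N M ms cs := by
  have hNm' : N.toNat ≤ ms.length := by omega
  have hNc' : N.toNat ≤ cs.length := by omega
  have hcsT0 : 0 ≤ (cs.take N.toNat).sum := List.sum_nonneg hcsT
  have hsumsplit := List.sum_take_add_sum_drop cs N.toNat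
  have hitemsR2 : ∀ p ∈ ((ms.take N.toNat).zip (cs.take N.toNat)).reverse, 0 ≤ p.2 := by
    rintro ⟨x, y⟩ hp
    exact hcsT y (List.of_mem_zip (List.mem_reverse.mp hp)).2
  have hsndR : ((((ms.take N.toNat).zip (cs.take N.toNat)).reverse).map (fun p => p.2)).sum
      = (cs.take N.toNat).sum := by
    rw [List.map_reverse, List.sum_reverse]
    rw [show (((ms.take N.toNat).zip (cs.take N.toNat)).map (fun p => p.2))
        = ((ms.take N.toNat).zip (cs.take N.toNat)).map Prod.snd from rfl]
    rw [List.map_snd_zip (by rw [List.length_take, List.length_take]; omega)]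
  have hrange : PySem.List.pyRange 0 N 1 = PySem.List.pyRange 0 ((N.toNat : Nat) : Int) 1 := by
    by_cases hN0 : 0 ≤ N
    · rw [Int.toNat_of_nonneg hN0]
    · rw [PySem.List.pyRange_one_eq_nil (by omega),
        PySem.List.pyRange_one_eq_nil (by omega : ((N.toNat : Nat) : Int) ≤ 0)]
  simp only [min_cost_to_free_memory, min_cost_to_free_memory_alt]
  rw [hrange, bBuild_inv N ms cs hNm' hNc' N.toNat le_rfl]
  by_cases hM : M ≤ 0
  · -- M ≤ 0: A's scan stops at budget 0 immediately, B returns 0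
    rw [if_pos hM]
    have hsum : 0 ≤ (cs.drop N.toNat).sum := by
      rcases hlast with h | h
      · exact h
      · omega
    have hmc0 : 0 ≤ cs.sum := by omega
    obtain ⟨hAlen, hAget⟩ := aOuter_inv N ms cs hNm' hNc' hcsT hmc0 N.toNat le_rfl
    have h01 : PySem.List.pyRange 0 (cs.sum + 1) 1 = 0 :: PySem.List.pyRange 1 (cs.sum + 1) 1 :=
      PySem.List.pyRange_one_cons (by omega)
    rw [h01, List.find?_cons_of_pos (by
      simp only [decide_eq_true_iff]
      rw [hAget 0 le_rfl hmc0]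
      exact le_trans hM (bestMem_nonneg _ _))]
  · rw [if_neg hM]
    have hMpos : 0 < M := by omega
    have hpc := pairsR_cost_nonneg _ hitemsR2
    rcases scan_spec M (pairsR (((ms.take N.toNat).zip (cs.take N.toNat)).reverse)) (-1)
        hpc (Or.inr rfl) with ⟨hEq, hNoq⟩ | ⟨hr0, ⟨q, hqmem, hq1, hq2⟩, hmin, _⟩
    · -- no subset frees ≥ M: both answer -1
      rw [hEq]
      by_cases hsum : 0 ≤ (cs.drop N.toNat).sum
      · have hmc0 : 0 ≤ cs.sum := by omega
        obtain ⟨hAlen, hAget⟩ := aOuter_inv N ms cs hNm' hNc' hcsT hmc0 N.toNat le_rfl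
        have hnone : (PySem.List.pyRange 0 (cs.sum + 1) 1).find?
            (fun k => decide (M ≤ PySem.List.pyGetD
              ((PySem.List.pyRange 0 ((N.toNat : Nat) : Int) 1).foldl
                (fun dp i => aInner cs.sum
                  (PySem.List.pyGetD ms i 0) (PySem.List.pyGetD cs i 0) dp)
                (List.replicate (cs.sum + 1).toNat 0)) k 0)) = none := by
          rw [List.find?_eq_none]
          intro x hx
          have hx' := PySem.List.mem_pyRange_one.mp hx
          simp only [decide_eq_true_iff, not_le]
          rw [hAget x hx'.1 (by omega)]
          by_contra hcon
          rw [not_lt] at hcon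
          obtain ⟨w, hw, hw1, _⟩ := (bestMem_pairs _ hitemsR2 M x hx'.1).mp hcon
          exact ((hNoq w hw hw1).1) rfl
        rw [hnone]
      · -- vacuous corner: N ≤ 0, M > 0 and sum(costs) < 0, both -1 trivially
        obtain ⟨hN0, _⟩ := hlast.resolve_left hsum
        have hTnil : N.toNat = 0 := by omega
        have hcssum : cs.sum < 0 := by
          rw [hTnil] at hsumsplit
          simp only [List.take_zero, List.sum_nil, List.drop_zero, zero_add] at hsumsplit
          rw [hTnil] at hsum
          simp only [List.drop_zero] at hsum
          omega
        rw [PySem.List.pyRange_one_eq_nil (by omega : cs.sum + 1 ≤ 0)]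
        simp only [List.find?_nil]
    · -- some subset qualifies: both answer the minimum qualifying cost r
      set r := (pairsR (((ms.take N.toNat).zip (cs.take N.toNat)).reverse)).foldl
        (fun best p => if M ≤ p.1 ∧ (best = -1 ∨ p.2 < best) then p.2 else best) (-1) with hrdef
      have hsum : 0 ≤ (cs.drop N.toNat).sum := by
        rcases hlast with h | h
        · exact h
        · -- N ≤ 0 would make the only pair (0,0), which cannot free M > 0
          exfalso
          have hTnil : N.toNat = 0 := by omega
          rw [hTnil] at hqmem
          simp only [List.take_zero, List.zip_nil_left, List.reverse_nil, pairsR,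
            List.mem_singleton] at hqmem
          subst hqmem
          simp only at hq1
          omega
      have hmc0 : 0 ≤ cs.sum := by omega
      have hcsTle : (cs.take N.toNat).sum ≤ cs.sum := by omega
      obtain ⟨hAlen, hAget⟩ := aOuter_inv N ms cs hNm' hNc' hcsT hmc0 N.toNat le_rfl
      have hrcs : r ≤ cs.sum := by
        have := pairsR_cost_le_csum _ hitemsR2 q hqmem
        rw [hsndR] at this
        omega
      have hsplitR : PySem.List.pyRange 0 (cs.sum + 1) 1 =
          PySem.List.pyRange 0 r 1 ++ PySem.List.pyRange r (cs.sum + 1) 1 :=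
        PySem.List.pyRange_one_append 0 r (cs.sum + 1) hr0 (by omega)
      rw [hsplitR, List.find?_append]
      have hfirst : (PySem.List.pyRange 0 r 1).find?
          (fun k => decide (M ≤ PySem.List.pyGetD
            ((PySem.List.pyRange 0 ((N.toNat : Nat) : Int) 1).foldl
              (fun dp i => aInner cs.sum
                (PySem.List.pyGetD ms i 0) (PySem.List.pyGetD cs i 0) dp)
              (List.replicate (cs.sum + 1).toNat 0)) k 0)) = none := by
        rw [List.find?_eq_none]
        intro x hx
        have hx' := PySem.List.mem_pyRange_one.mp hx
        simp only [decide_eq_true_iff, not_le]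
        rw [hAget x hx'.1 (by omega)]
        by_contra hcon
        rw [not_lt] at hcon
        obtain ⟨w, hw, hw1, hw2⟩ := (bestMem_pairs _ hitemsR2 M x hx'.1).mp hcon
        have := hmin w hw hw1
        omega
      rw [hfirst, Option.none_or]
      rw [PySem.List.pyRange_one_cons (by omega : r < cs.sum + 1)]
      rw [List.find?_cons_of_pos (by
        simp only [decide_eq_true_iff]
        rw [hAget r hr0 hrcs]
        exact (bestMem_pairs _ hitemsR2 M r hr0).mpr ⟨q, hqmem, hq1, by omega⟩)]

-- ===== VERDICT (by name: the statement is the Claim_ definition above) =====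
theorem min_cost_to_free_memory_spec : Claim_equal_min_cost_to_free_memory := by
  intro N M ms cs _ hpre
  obtain ⟨hNm, hNc, hcsT, hlast⟩ := hpre
  exact final_assembly N M ms cs hNm hNc hcsT hlast
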